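-- pv_equiv track=rewrite | github.com/YBCS/aoc | aoc2024/02.py | is_safe_II
-- ===== SOURCE A (Python) =====
-- def is_safe_II(items):
-- 	# if removing one item makes it okay
--
-- 	for i in range(1, len(items)):
-- 		a, b = items[i-1], items[i]
-- 		diff = abs(a - b)
-- 		if diff < 1 or diff > 3:
-- 			return False
--
-- 	if sorted(items) == items: return True
-- 	if sorted(items, reverse=True) == items: return True
--
-- 	return False
-- ===== SOURCE B (Python) =====
-- def is_safe_II(items):
--     # Single pass: each adjacent diff must have |diff| in [1,3], and all diffs
--     # must share one sign (strictly increasing or strictly decreasing).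
--     inc = dec = True
--     for a, b in zip(items, items[1:]):
--         d = b - a
--         if not (1 <= abs(d) <= 3):
--             return False
--         if d > 0:
--             dec = False
--         else:
--             inc = False
--     return inc or dec
-- ===== Notes on version B (the rewrite author's own statement) =====
-- stated objective: alternative
-- what changed: Replaced the two sorted() comparisons after the diff loop by a single linear pass that tracks increasing/decreasing flags while checking each adjacent difference.
import Mathlib
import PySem

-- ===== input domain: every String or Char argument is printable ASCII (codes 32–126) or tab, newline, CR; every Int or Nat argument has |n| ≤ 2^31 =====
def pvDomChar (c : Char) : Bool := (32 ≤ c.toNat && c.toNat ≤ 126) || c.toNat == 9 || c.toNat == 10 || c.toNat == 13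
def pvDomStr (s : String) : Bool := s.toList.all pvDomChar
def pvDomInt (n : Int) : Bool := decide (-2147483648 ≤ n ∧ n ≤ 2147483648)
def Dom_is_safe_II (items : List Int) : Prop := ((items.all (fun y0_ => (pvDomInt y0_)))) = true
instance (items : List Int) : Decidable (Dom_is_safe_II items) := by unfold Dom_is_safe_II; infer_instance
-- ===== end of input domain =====

-- B replaces A's two sorted() comparisons by one linear pass tracking inc/dec flags (alternative algorithm, no sorting).
-- ===== PORT A =====
-- for-loop body "if diff < 1 or diff > 3: return False" = .all over range(1, len(items));
-- indices i-1, i are always in range there, so pyGetD with default 0 is exact.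
def is_safe_II (items : List Int) : Bool :=
  if (PySem.List.pyRange 1 items.length 1).all (fun i =>
      let a := PySem.List.pyGetD items (i - 1) 0
      let b := PySem.List.pyGetD items i 0
      let diff := |a - b|
      !(decide (diff < 1) || decide (diff > 3))) then
    if PySem.List.sorted items (fun x => x) false == items then true
    else if PySem.List.sorted items (fun x => x) true == items then true
    else false
  else false

-- ===== PORT B =====
-- the for-loop of Source B with its two flags and early return
def isSafeIIAltLoop (pairs : List (Int × Int)) (inc dec : Bool) : Bool :=
  match pairs with
  | [] => inc || dec
  | (a, b) :: rest =>
    let d := b - a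
    if !(decide (1 ≤ |d|) && decide (|d| ≤ 3)) then false
    else if d > 0 then isSafeIIAltLoop rest inc false
    else isSafeIIAltLoop rest false dec

def is_safe_II_alt (items : List Int) : Bool :=
  isSafeIIAltLoop (items.zip items.tail) true true

-- ===== PRECONDITION & SPEC =====
def Spec_is_safe_II (items : List Int) (out : Bool) : Prop := out = is_safe_II_alt items
instance (items : List Int) (out : Bool) : Decidable (Spec_is_safe_II items out) := by unfold Spec_is_safe_II; infer_instance

-- ===== CLAIM (what is proved, stated in full; the proofs are below) =====
def Claim_equal_is_safe_II : Prop := ∀ (items : List Int), Dom_is_safe_II items → Spec_is_safe_II items (is_safe_II items)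

-- ===== LEMMAS AND PROOFS =====

-- the adjacency condition both programs check: every consecutive difference has absolute value in [1,3]
def PadjOK (items : List Int) : Prop :=
  ∀ (j : Nat) (_h : j + 1 < items.length), 1 ≤ |items[j] - items[j+1]| ∧ |items[j] - items[j+1]| ≤ 3

-- an .all over items.zip items.tail is a statement about the consecutive pairs
theorem zip_all_iff (items : List Int) (f : Int × Int → Bool) :
    (items.zip items.tail).all f = true ↔
    ∀ (j : Nat) (h : j + 1 < items.length), f (items[j], items[j+1]) = true := by
  rw [List.all_eq_true]
  constructor
  · intro h j hj
    apply h
    rw [List.mem_iff_getElem]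
    refine ⟨j, by simp [List.length_tail]; omega, ?_⟩
    simp [List.getElem_zip, List.getElem_tail]
  · intro h p hp
    rw [List.mem_iff_getElem] at hp
    obtain ⟨i, hi, rfl⟩ := hp
    have hlen : i + 1 < items.length := by
      simp [List.length_zip, List.length_tail] at hi; omega
    simpa [List.getElem_zip, List.getElem_tail] using h i hlen

-- an .all over range(1, len(items)) is a statement about the indices j+1, 1 ≤ j+1 < len
theorem range_all_iff (items : List Int) (f : Int → Bool) :
    ((PySem.List.pyRange 1 items.length 1).all f = true) ↔
    ∀ (j : Nat), j + 1 < items.length → f ((j : Int) + 1) = true := by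
  rw [List.all_eq_true]
  constructor
  · intro h j hj
    apply h
    rw [PySem.List.mem_pyRange_one]
    omega
  · intro h i hi
    rw [PySem.List.mem_pyRange_one] at hi
    have hj : ((i - 1).toNat : Int) + 1 = i := by omega
    have := h (i - 1).toNat (by omega)
    rwa [hj] at this

theorem pyGetD_pair (items : List Int) (j : Nat) (h : j + 1 < items.length) :
    PySem.List.pyGetD items ((j : Int) + 1 - 1) 0 = items[j] ∧
    PySem.List.pyGetD items ((j : Int) + 1) 0 = items[j+1] := by
  constructor
  · rw [PySem.List.pyGetD_eq_getElem items (d := 0) (by omega) (by omega)]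
    congr 1; omega
  · rw [PySem.List.pyGetD_eq_getElem items (d := 0) (by omega) (by omega)]
    simp

-- what B's loop computes, for any flag values
theorem altLoop_eq (ps : List (Int × Int)) (inc dec : Bool) :
    isSafeIIAltLoop ps inc dec =
      (ps.all (fun p => decide (1 ≤ |p.2 - p.1|) && decide (|p.2 - p.1| ≤ 3)) &&
       ((inc && ps.all (fun p => decide (p.2 - p.1 > 0))) ||
        (dec && ps.all (fun p => !decide (p.2 - p.1 > 0))))) := by
  induction ps generalizing inc dec with
  | nil => simp [isSafeIIAltLoop]
  | cons p rest ih =>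
    obtain ⟨a, b⟩ := p
    simp only [isSafeIIAltLoop, List.all_cons]
    by_cases hok : (1 ≤ |b - a| ∧ |b - a| ≤ 3)
    · by_cases hd : b - a > 0
      · have hd' : a < b := by omega
        simp [hok.1, hok.2, hd', ih]
      · have hd' : ¬ a < b := by omega
        simp [hok.1, hok.2, hd', ih]
    · rcases (not_and_or.mp hok) with h | h <;> simp [h]

-- sorted(items) == items means non-decreasing (and the reverse twin)
theorem sorted_eq_iff (items : List Int) :
    (PySem.List.sorted items (fun x => x) false = items) ↔ items.Pairwise (· ≤ ·) := by
  constructor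
  · intro h
    have := PySem.List.sorted_pairwise items (fun x => x)
    rw [h] at this
    simpa using this
  · intro h
    exact PySem.List.sorted_eq_self_of_pairwise items (fun x => x) (by simpa using h)

theorem sorted_rev_eq_iff (items : List Int) :
    (PySem.List.sorted items (fun x => x) true = items) ↔ items.Pairwise (fun a b => b ≤ a) := by
  constructor
  · intro h
    have := PySem.List.sorted_pairwise_rev items (fun x => x)
    rw [h] at this
    simpa using this
  · intro h
    exact PySem.List.sorted_rev_eq_self_of_pairwise items (fun x => x) (by simpa using h)

theorem isSafeII_iff (items : List Int) :
    is_safe_II items = true ↔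
      PadjOK items ∧ (items.Pairwise (· ≤ ·) ∨ items.Pairwise (fun a b => b ≤ a)) := by
  unfold is_safe_II
  have hloop : ((PySem.List.pyRange 1 items.length 1).all (fun i =>
      let a := PySem.List.pyGetD items (i - 1) 0
      let b := PySem.List.pyGetD items i 0
      let diff := |a - b|
      !(decide (diff < 1) || decide (diff > 3))) = true) ↔ PadjOK items := by
    rw [range_all_iff]
    constructor
    · intro h j hj
      have := h j hj
      rw [(pyGetD_pair items j hj).1, (pyGetD_pair items j hj).2] at this
      simp only [Bool.not_eq_true', Bool.or_eq_false_iff, decide_eq_false_iff_not] at this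
      omega
    · intro h j hj
      rw [(pyGetD_pair items j hj).1, (pyGetD_pair items j hj).2]
      have := h j hj
      simp only [Bool.not_eq_true', Bool.or_eq_false_iff, decide_eq_false_iff_not]
      omega
  split_ifs with h1 h2 h3
  · simp only [true_iff]
    exact ⟨hloop.mp h1, Or.inl ((sorted_eq_iff items).mp (by simpa using h2))⟩
  · simp only [true_iff]
    exact ⟨hloop.mp h1, Or.inr ((sorted_rev_eq_iff items).mp (by simpa using h3))⟩
  · simp only [false_iff]
    rintro ⟨_, hc | hc⟩
    · exact h2 (by simpa using (sorted_eq_iff items).mpr hc)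
    · exact h3 (by simpa using (sorted_rev_eq_iff items).mpr hc)
  · simp only [false_iff]
    rintro ⟨hp, _⟩
    exact h1 (hloop.mpr hp)

theorem isSafeIIAlt_iff (items : List Int) :
    is_safe_II_alt items = true ↔
      PadjOK items ∧ ((∀ (j : Nat) (_h : j + 1 < items.length), items[j] < items[j+1]) ∨
                      (∀ (j : Nat) (_h : j + 1 < items.length), ¬ items[j] < items[j+1])) := by
  unfold is_safe_II_alt
  rw [altLoop_eq]
  simp only [Bool.and_eq_true, Bool.or_eq_true, Bool.true_and]
  rw [zip_all_iff, zip_all_iff, zip_all_iff]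
  constructor
  · rintro ⟨hok, hdir⟩
    refine ⟨fun j hj => by have := hok j hj; simp at this; rw [abs_sub_comm]; omega, ?_⟩
    rcases hdir with h | h
    · exact Or.inl (fun j hj => by have := h j hj; simp at this; omega)
    · exact Or.inr (fun j hj => by have := h j hj; simp at this; omega)
  · rintro ⟨hok, hdir⟩
    refine ⟨fun j hj => by have := hok j hj; rw [abs_sub_comm] at this; simp; omega, ?_⟩
    rcases hdir with h | h
    · exact Or.inl (fun j hj => by have := h j hj; simp; omega)
    · exact Or.inr (fun j hj => by have := h j hj; simp; omega)

-- under PadjOK adjacent elements are never equal, so monotone-by-sorting equals strict one-direction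
theorem pairwise_le_iff_adj (items : List Int) :
    items.Pairwise (· ≤ ·) ↔ ∀ (j : Nat) (_h : j + 1 < items.length), items[j] ≤ items[j+1] := by
  rw [← List.isChain_iff_pairwise, List.isChain_iff_getElem]

theorem pairwise_ge_iff_adj (items : List Int) :
    items.Pairwise (fun a b => b ≤ a) ↔ ∀ (j : Nat) (_h : j + 1 < items.length), items[j+1] ≤ items[j] := by
  rw [← @List.isChain_iff_pairwise Int (fun a b => b ≤ a) items ⟨fun h1 h2 => le_trans h2 h1⟩,
      List.isChain_iff_getElem]

-- ===== VERDICT (by name: the statement is the Claim_ definition above) =====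
theorem is_safe_II_spec : Claim_equal_is_safe_II := by
  intro items _
  unfold Spec_is_safe_II
  rw [Bool.eq_iff_iff, isSafeII_iff, isSafeIIAlt_iff]
  constructor
  · rintro ⟨hok, hdir⟩
    refine ⟨hok, ?_⟩
    rcases hdir with h | h
    · rw [pairwise_le_iff_adj] at h
      exact Or.inl (fun j hj => by have h1 := hok j hj; have h2 := h j hj; rcases abs_cases (items[j] - items[j+1]) with ⟨he, _⟩ | ⟨he, _⟩ <;> omega)
    · rw [pairwise_ge_iff_adj] at h
      exact Or.inr (fun j hj => by have := hok j hj; have := h j hj; omega)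
  · rintro ⟨hok, hdir⟩
    refine ⟨hok, ?_⟩
    rcases hdir with h | h
    · exact Or.inl ((pairwise_le_iff_adj items).mpr (fun j hj => le_of_lt (h j hj)))
    · exact Or.inr ((pairwise_ge_iff_adj items).mpr (fun j hj => by have := hok j hj; have := h j hj; omega))
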